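-- pv_equiv track=rewrite | github.com/ashrobertsdragon/LoreBinders | characteranalysis.py | compare_names
-- ===== SOURCE A (Python) =====
-- def compare_names(inner_values):
--
--   compared_names = {}
--
--   for i, value_i in enumerate(inner_values):
--     for j, value_j in enumerate(inner_values):
--       if i != j and value_i != value_j and not value_i.endswith(")") and (value_i.startswith(value_j) or value_i.endswith(value_j)):
--           shorter_value, longer_value = sorted([value_i, value_j], key = len)
--           compared_names[shorter_value] = longer_value
--
--   longer_name = [compared_names.get(name, name) for name in inner_values]
--   inner_values = list(dict.fromkeys(longer_name)) #Deduplicate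
--
--   stop_words = ["none", "mentioned", "unknown", "he", "they", "she", "we", "it", "boy", "girl", "main"] # Entries with these words should be removed
--   inner_values = [value for value in inner_values if not any(word in value.lower() for word in stop_words)]
--
--
--   return inner_values
-- ===== SOURCE B (Python) =====
-- def compare_names(inner_values):
--     stop_words = ["none", "mentioned", "unknown", "he", "they", "she", "we", "it", "boy", "girl", "main"]
--
--     def replacement(v):
--         # last (in list order) longer name that starts or ends with v wins,
--         # scanned back-to-front with early exit
--         for t in reversed(inner_values):
--             if t != v and not t.endswith(")") and (t.startswith(v) or t.endswith(v)):
--                 return t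
--         return v
--
--     seen = set()
--     result = []
--     for v in inner_values:
--         r = replacement(v)
--         if r in seen:
--             continue
--         seen.add(r)
--         low = r.lower()
--         if not any(w in low for w in stop_words):
--             result.append(r)
--     return result
-- ===== Notes on version B (the rewrite author's own statement) =====
-- stated objective: faster
-- what changed: Replaces A's dict built from all O(n^2) index pairs plus three separate passes (map, dedupe, filter) by a per-name back-to-front scan with early exit that yields the winning longer name directly, fused with deduplication and stop-word filtering into a single pass with a seen-set.
import Mathlib
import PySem

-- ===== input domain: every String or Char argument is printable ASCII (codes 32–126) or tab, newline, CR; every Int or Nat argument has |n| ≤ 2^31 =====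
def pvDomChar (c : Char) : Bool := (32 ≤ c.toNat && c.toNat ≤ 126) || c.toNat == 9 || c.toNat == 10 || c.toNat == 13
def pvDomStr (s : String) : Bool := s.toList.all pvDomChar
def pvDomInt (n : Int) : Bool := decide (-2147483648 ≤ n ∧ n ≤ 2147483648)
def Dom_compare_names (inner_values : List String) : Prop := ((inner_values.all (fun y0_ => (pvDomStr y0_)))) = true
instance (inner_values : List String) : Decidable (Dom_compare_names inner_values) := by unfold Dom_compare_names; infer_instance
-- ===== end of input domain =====

-- B replaces A's quadratic pair-dict construction by a per-name back-to-front scan with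
-- early exit, fused with deduplication and stop-word filtering in a single pass (objective: alternative).

-- ===== PORT A =====
-- inner loop body of A's nested 'for j, value_j in enumerate(inner_values)'
def cnInnerA (vi : String) (i : Int) (d : PySem.Dict String String) (q : Int × String) :
    PySem.Dict String String :=
  if i ≠ q.1 ∧ vi ≠ q.2 ∧ ¬ PySem.Str.endswith vi ")" = true ∧
      (PySem.Str.startswith vi q.2 = true ∨ PySem.Str.endswith vi q.2 = true) then
    match PySem.List.sorted [vi, q.2] (fun s => PySem.Str.len s) with
    | [shorter, longer] => d.insert shorter longer
    | _ => d
  else d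

def compare_names (inner_values : List String) : List String :=
  let compared_names : PySem.Dict String String :=
    (PySem.List.enumerate inner_values).foldl
      (fun d p => (PySem.List.enumerate inner_values).foldl (cnInnerA p.2 p.1) d)
      PySem.Dict.empty
  let longer_name := inner_values.map (fun name => compared_names.getD name name)
  let inner_values2 := PySem.List.dedup longer_name
  let stop_words := ["none", "mentioned", "unknown", "he", "they", "she", "we", "it", "boy", "girl", "main"]
  inner_values2.filter (fun value => !(stop_words.any (fun word => PySem.Str.isIn word (PySem.Str.lower value))))

-- ===== PORT B =====
def cnStop : List String := ["none", "mentioned", "unknown", "he", "they", "she", "we", "it", "boy", "girl", "main"]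

def cnMatch (v t : String) : Bool :=
  t != v && !(PySem.Str.endswith t ")") && (PySem.Str.startswith t v || PySem.Str.endswith t v)

-- 'for t in reversed(inner_values): … return t' / 'return v'
def cnRepl (inner_values : List String) (v : String) : String :=
  match inner_values.reverse.find? (cnMatch v) with
  | some t => t
  | none => v

def cnKeep (r : String) : Bool := !(cnStop.any (fun w => PySem.Str.isIn w (PySem.Str.lower r)))

-- the single fused pass: dedupe via 'seen', filter, append
def cnLoop (inner_values : List String) :
    List String → PySem.Set String → List String → List String
  | [], _, out => out
  | v :: rest, seen, out =>
    let r := cnRepl inner_values v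
    if PySem.Set.contains seen r then cnLoop inner_values rest seen out
    else cnLoop inner_values rest (PySem.Set.add seen r) (if cnKeep r then out ++ [r] else out)

def compare_names_alt (inner_values : List String) : List String :=
  cnLoop inner_values inner_values PySem.Set.empty []

-- ===== PRECONDITION & SPEC =====
def Spec_compare_names (inner_values : List String) (out : List String) : Prop := out = compare_names_alt inner_values
instance (inner_values : List String) (out : List String) : Decidable (Spec_compare_names inner_values out) := by unfold Spec_compare_names; infer_instance

-- ===== CLAIM (what is proved, stated in full; the proofs are below) =====
def Claim_equal_compare_names : Prop := ∀ (inner_values : List String), Dom_compare_names inner_values → Spec_compare_names inner_values (compare_names inner_values)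

-- ===== LEMMAS AND PROOFS =====

-- a match 't.startswith(v) or t.endswith(v)' with t ≠ v forces v strictly shorter
theorem cnMatch_len_lt (v t : String) (h : cnMatch v t = true) :
    PySem.Str.len v < PySem.Str.len t := by
  unfold cnMatch at h
  simp only [Bool.and_eq_true, Bool.or_eq_true, bne_iff_ne, ne_eq, Bool.not_eq_true'] at h
  obtain ⟨⟨hne, -⟩, hps⟩ := h
  have hlen : v.toList.length ≤ t.toList.length ∧ (v.toList.length = t.toList.length → v = t) := by
    rcases hps with hp | hp
    · rw [PySem.Str.startswith_eq, PySem.Chars.startswith_iff] at hp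
      exact ⟨hp.length_le, fun he => String.toList_inj.mp (hp.eq_of_length he)⟩
    · rw [PySem.Str.endswith_eq, PySem.Chars.endswith_iff] at hp
      exact ⟨hp.length_le, fun he => String.toList_inj.mp (hp.eq_of_length he)⟩
  rw [PySem.Str.len_eq, PySem.Str.len_eq]
  have : v.toList.length ≠ t.toList.length := fun he => hne (hlen.2 he).symm
  omega

theorem sorted_pair_of_lt (a b : String)
    (h : PySem.Str.len b < PySem.Str.len a) :
    PySem.List.sorted [a, b] (fun s => PySem.Str.len s) = [b, a] := by
  rw [PySem.List.sorted_eq_foldl_insertBy]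
  simp only [List.foldl_cons, List.foldl_nil, PySem.List.insertBy]
  rw [if_pos (decide_eq_true h)]

-- cnMatch implies the candidate differs from the key
theorem cnMatch_ne (v t : String) (h : cnMatch v t = true) : t ≠ v := by
  unfold cnMatch at h
  simp only [Bool.and_eq_true, bne_iff_ne, ne_eq] at h
  exact h.1.1

-- A's inner body, rewritten through the lemmas above
theorem cnInnerA_eq (vi : String) (i : Int) (d : PySem.Dict String String) (q : Int × String) :
    cnInnerA vi i d q = if i ≠ q.1 ∧ cnMatch q.2 vi = true then d.insert q.2 vi else d := by
  unfold cnInnerA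
  have hiff : (vi ≠ q.2 ∧ ¬ PySem.Str.endswith vi ")" = true ∧
      (PySem.Str.startswith vi q.2 = true ∨ PySem.Str.endswith vi q.2 = true)) ↔ cnMatch q.2 vi = true := by
    unfold cnMatch
    simp only [Bool.and_eq_true, Bool.or_eq_true, bne_iff_ne, ne_eq, Bool.not_eq_true, Bool.not_eq_true']
    tauto
  by_cases hi : i = q.1
  · simp [hi]
  · by_cases hm : cnMatch q.2 vi = true
    · rw [if_pos ⟨hi, (hiff.mpr hm)⟩, if_pos ⟨hi, hm⟩,
        sorted_pair_of_lt vi q.2 (cnMatch_len_lt q.2 vi hm)]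
    · rw [if_neg (fun hc => hm (hiff.mp hc.2)), if_neg (fun hc => hm hc.2)]

-- effect of A's whole inner loop on one key
theorem innerA_fold_get? (ps : List (Int × String)) (d : PySem.Dict String String)
    (i : Int) (vi s : String) :
    (ps.foldl (cnInnerA vi i) d).get? s =
      if cnMatch s vi = true ∧ (∃ q ∈ ps, q.2 = s ∧ i ≠ q.1) then some vi else d.get? s := by
  induction ps generalizing d with
  | nil => simp
  | cons q ps ih =>
    rw [List.foldl_cons, ih, cnInnerA_eq]
    by_cases hm : cnMatch s vi = true
    · by_cases hex : ∃ q' ∈ ps, q'.2 = s ∧ i ≠ q'.1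
      · rw [if_pos ⟨hm, hex⟩,
          if_pos ⟨hm, hex.choose, List.mem_cons_of_mem _ hex.choose_spec.1, hex.choose_spec.2⟩]
      · rw [if_neg (fun hc : cnMatch s vi = true ∧ ∃ q' ∈ ps, q'.2 = s ∧ i ≠ q'.1 => hex hc.2)]
        by_cases hq : q.2 = s ∧ i ≠ q.1
        · have hR : cnMatch s vi = true ∧ ∃ q' ∈ q :: ps, q'.2 = s ∧ i ≠ q'.1 :=
            ⟨hm, q, List.mem_cons_self, hq⟩
          rw [if_pos hR, if_pos ⟨hq.2, hq.1 ▸ hm⟩, PySem.Dict.get?_insert, if_pos hq.1.symm]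
        · have hR : ¬ (cnMatch s vi = true ∧ ∃ q' ∈ q :: ps, q'.2 = s ∧ i ≠ q'.1) := by
            rintro ⟨-, q', hq', hp⟩
            rcases List.mem_cons.mp hq' with rfl | hmem
            · exact hq hp
            · exact hex ⟨q', hmem, hp⟩
          rw [if_neg hR]
          split_ifs with h
          · have hq2 : ¬ q.2 = s := fun he => hq ⟨he, h.1⟩
            rw [PySem.Dict.get?_insert, if_neg (fun he : s = q.2 => hq2 he.symm)]
          · rfl
    · rw [if_neg (fun hc : cnMatch s vi = true ∧ ∃ q' ∈ ps, q'.2 = s ∧ i ≠ q'.1 => hm hc.1),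
        if_neg (fun hc : cnMatch s vi = true ∧ ∃ q' ∈ q :: ps, q'.2 = s ∧ i ≠ q'.1 => hm hc.1)]
      split_ifs with h
      · rw [PySem.Dict.get?_insert, if_neg (fun he : s = q.2 => hm (he ▸ h.2))]
      · rfl

-- effect of A's whole nested loop on one key: last matching outer element wins
theorem outerA_fold_get? (xs : List String) (qs : List (Int × String))
    (d : PySem.Dict String String) (s : String) :
    ((qs.foldl (fun d p => (PySem.List.enumerate xs).foldl (cnInnerA p.2 p.1) d) d).get? s) =
      match qs.reverse.find? (fun p => cnMatch s p.2 &&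
          decide (∃ q ∈ PySem.List.enumerate xs, q.2 = s ∧ p.1 ≠ q.1)) with
      | some p => some p.2
      | none => d.get? s := by
  induction qs generalizing d with
  | nil => simp
  | cons p qs ih =>
    rw [List.foldl_cons, ih, List.reverse_cons, List.find?_append]
    cases hf : qs.reverse.find? (fun p => cnMatch s p.2 &&
        decide (∃ q ∈ PySem.List.enumerate xs, q.2 = s ∧ p.1 ≠ q.1)) with
    | some p' => simp
    | none =>
      rw [innerA_fold_get?]
      by_cases hp : cnMatch s p.2 = true ∧ ∃ q ∈ PySem.List.enumerate xs, q.2 = s ∧ p.1 ≠ q.1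
      · rw [if_pos hp]
        simp [List.find?, hp.1, hp.2]
      · rw [if_neg hp]
        cases h1 : cnMatch s p.2 with
        | false => simp [List.find?, h1]
        | true =>
          have h2 : ¬ ∃ q ∈ PySem.List.enumerate xs, q.2 = s ∧ p.1 ≠ q.1 :=
            fun he => hp ⟨h1, he⟩
          simp [List.find?, h1, h2]

-- for a name s of the list, the auxiliary existential is implied by a match
theorem find?_pred_simp (xs : List String) (s : String) (hs : s ∈ xs) (p : Int × String)
    (hp : p ∈ (PySem.List.enumerate xs).reverse) :
    (cnMatch s p.2 && decide (∃ q ∈ PySem.List.enumerate xs, q.2 = s ∧ p.1 ≠ q.1))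
      = cnMatch s p.2 := by
  cases hm : cnMatch s p.2 with
  | false => simp
  | true =>
    have hne : p.2 ≠ s := cnMatch_ne s p.2 hm
    obtain ⟨k, hk, hks⟩ := List.mem_iff_getElem.mp hs
    have hqmem : ((0 : Int) + (k : Int), xs[k]) ∈ PySem.List.enumerate xs :=
      (PySem.List.mem_enumerate_iff xs 0 _).mpr ⟨k, hk, rfl⟩
    have hex : ∃ q ∈ PySem.List.enumerate xs, q.2 = s ∧ p.1 ≠ q.1 := by
      refine ⟨((0 : Int) + (k : Int), xs[k]), hqmem, hks, ?_⟩
      intro hfst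
      obtain ⟨k', hk', hpk⟩ := (PySem.List.mem_enumerate_iff xs 0 p).mp (List.mem_reverse.mp hp)
      have hkk : k' = k := by
        have h' := hfst
        rw [hpk] at h'
        simp only at h'
        omega
      apply hne
      rw [hpk]
      simp only [hkk]
      exact hks
    simp [hex]

-- generic: find? only depends on the predicate's values on the list
theorem find?_congr_mem {α : Type} (l : List α) (p q : α → Bool)
    (h : ∀ x ∈ l, p x = q x) : l.find? p = l.find? q := by
  induction l with
  | nil => rfl
  | cons x l ih =>
    rw [List.find?_cons, List.find?_cons, h x List.mem_cons_self,
      ih (fun y hy => h y (List.mem_cons_of_mem _ hy))]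

-- A's dictionary lookup is B's back-to-front scan
theorem getD_eq_cnRepl (xs : List String) (s : String) (hs : s ∈ xs) :
    (((PySem.List.enumerate xs).foldl
        (fun d p => (PySem.List.enumerate xs).foldl (cnInnerA p.2 p.1) d)
        PySem.Dict.empty).getD s s) = cnRepl xs s := by
  rw [PySem.Dict.getD_eq_get?_getD, outerA_fold_get?,
    find?_congr_mem _ _ (fun p => cnMatch s p.2) (fun p hp => find?_pred_simp xs s hs p hp)]
  have hmapfind : xs.reverse.find? (cnMatch s)
      = Option.map (fun p => p.2) ((PySem.List.enumerate xs).reverse.find? (fun p => cnMatch s p.2)) := by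
    conv_lhs => rw [← PySem.List.map_snd_enumerate xs 0, ← List.map_reverse, List.find?_map]
    rfl
  unfold cnRepl
  rw [hmapfind]
  cases hf : (PySem.List.enumerate xs).reverse.find? (fun p => cnMatch s p.2) with
  | some p => simp
  | none => simp [PySem.Dict.get?_empty]

-- proof-side recursion capturing "new elements, in first-appearance order"
def cnFresh (seen : PySem.Set String) : List String → List String
  | [] => []
  | r :: rs =>
    if PySem.Set.contains seen r then cnFresh seen rs
    else r :: cnFresh (PySem.Set.add seen r) rs

theorem foldl_add_eq_fresh (l : List String) (seen : PySem.Set String) :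
    l.foldl PySem.Set.add seen = seen ++ cnFresh seen l := by
  induction l generalizing seen with
  | nil => simp [cnFresh]
  | cons r rs ih =>
    by_cases h : r ∈ seen
    · have hc : PySem.Set.add seen r = seen := by simp [PySem.Set.add, PySem.Set.contains, h]
      rw [List.foldl_cons, hc, ih]
      simp [cnFresh, PySem.Set.contains, h]
    · have hc : PySem.Set.add seen r = seen ++ [r] := by simp [PySem.Set.add, PySem.Set.contains, h]
      rw [List.foldl_cons, hc, ih]
      simp [cnFresh, PySem.Set.contains, h]

theorem cnLoop_eq (xs ys : List String) (seen : PySem.Set String) (out : List String) :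
    cnLoop xs ys seen out = out ++ (cnFresh seen (ys.map (cnRepl xs))).filter cnKeep := by
  induction ys generalizing seen out with
  | nil => simp [cnLoop, cnFresh]
  | cons v rest ih =>
    simp only [cnLoop, List.map_cons, cnFresh]
    by_cases h : PySem.Set.contains seen (cnRepl xs v) = true
    · rw [if_pos h, if_pos h, ih]
    · rw [if_neg h, if_neg h, ih, List.filter_cons]
      by_cases hk : cnKeep (cnRepl xs v) = true
      · simp [hk]
      · simp [hk]

-- ===== VERDICT (by name: the statement is the Claim_ definition above) =====
theorem compare_names_spec : Claim_equal_compare_names := by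
  intro xs _
  unfold Spec_compare_names
  have hA : compare_names xs =
      (PySem.List.dedup (xs.map (fun name =>
        (((PySem.List.enumerate xs).foldl
            (fun d p => (PySem.List.enumerate xs).foldl (cnInnerA p.2 p.1) d)
            PySem.Dict.empty)).getD name name))).filter cnKeep := rfl
  have hmap : xs.map (fun name =>
      (((PySem.List.enumerate xs).foldl
          (fun d p => (PySem.List.enumerate xs).foldl (cnInnerA p.2 p.1) d)
          PySem.Dict.empty)).getD name name) = xs.map (cnRepl xs) :=
    List.map_congr_left (fun s hs => getD_eq_cnRepl xs s hs)
  have hB : compare_names_alt xs = cnLoop xs xs PySem.Set.empty [] := rfl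
  rw [hA, hmap, PySem.List.dedup_eq_ofList, PySem.Set.ofList_eq_foldl,
    foldl_add_eq_fresh, hB, cnLoop_eq]
  simp [PySem.Set.empty]
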